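-- pv_equiv track=rewrite | github.com/edwardkong/aoc | day16/solution.py | energized_tiles
-- ===== SOURCE A (Python) =====
-- def energized_tiles(tiles: list[str]):
--     splits = []
--     seen = set()
--     most = 0
--     starts = []
--     #curr, dir = (0, 0), (0, 1)
--
--     starts.extend([(0, x, 1, 0) for x in range(len(tiles))])
--     starts.extend([(len(tiles[0]) - 1, x, -1, 0) for x in range(len(tiles))])
--     starts.extend([(x, 0, 0, 1) for x in range(len(tiles[0]))])
--     starts.extend([(x, len(tiles) - 1, 0, -1) for x in range(len(tiles[0]))])
--
--     for s in starts:
--         curr, dir = (s[0], s[1]), (s[2], s[3])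
--         splits = []
--         seen = set()
--         while True:
--             if (not (0 <= curr[0] < len(tiles[0])) or
--                 not (0 <= curr[1] < len(tiles)) or
--                 #dir in seen[curr[0]][curr[1]]
--                 (curr[0], curr[1], dir[0], dir[1]) in seen):
--                 if not splits:
--                     break
--                 curr, dir = splits.pop()
--
--             seen.add((curr[0], curr[1], dir[0], dir[1]))
--             sq = tiles[curr[1]][curr[0]]
--
--             if sq == '\\':
--                 dir = (dir[1], dir[0])
--             elif sq == '/':
--                 dir = (-dir[1], -dir[0])
--             elif sq == '|':
--                 if dir[0]:
--                     splits.append((curr, (0, dir[0])))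
--                     dir = (0, -dir[0])
--             elif sq == '-':
--                 if dir[1]:
--                     splits.append((curr, (dir[1], 0)))
--                     dir = (-dir[1], 0)
--
--             curr = tuple(c + d for c, d in zip(curr, dir))
--         most = max(most, len({(s[0], s[1]) for s in seen}))
--
--     #return len({(s[0], s[1]) for s in seen})
--     return most
-- ===== SOURCE B (Python) =====
-- def energized_tiles(tiles: list[str]):
--     rows, cols = len(tiles), len(tiles[0])
--
--     def outgoing(ch, dx, dy):
--         if ch == '\\':
--             return [(dy, dx)]
--         if ch == '/':
--             return [(-dy, -dx)]
--         if ch == '|' and dx != 0: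
--             return [(0, 1), (0, -1)]
--         if ch == '-' and dy != 0:
--             return [(1, 0), (-1, 0)]
--         return [(dx, dy)]
--
--     def step(states):
--         out = set(states)
--         for x, y, dx, dy in states:
--             for ox, oy in outgoing(tiles[y][x], dx, dy):
--                 nx, ny = x + ox, y + oy
--                 if 0 <= nx < cols and 0 <= ny < rows:
--                     out.add((nx, ny, ox, oy))
--         return out
--
--     starts = ([(0, y, 1, 0) for y in range(rows)]
--               + [(cols - 1, y, -1, 0) for y in range(rows)]
--               + [(x, 0, 0, 1) for x in range(cols)]
--               + [(x, rows - 1, 0, -1) for x in range(cols)])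
--
--     best = 0
--     for sx, sy, sdx, sdy in starts:
--         seen = {(sx, sy, sdx, sdy)} if 0 <= sx < cols and 0 <= sy < rows else set()
--         while True:
--             nxt = step(seen)
--             if nxt == seen:
--                 break
--             seen = nxt
--         best = max(best, len({(x, y) for x, y, _, _ in seen}))
--     return best
-- ===== Notes on version B (the rewrite author's own statement) =====
-- stated objective: alternative
-- what changed: A walks a single beam step by step, backtracking through a `splits` stack pushed at splitters; B does no beam walking at all: it computes the set of reachable beam states as a Kleene fixpoint, repeatedly applying the whole-set one-step successor operator `step` to the current state set until it is stable, then counts distinct positions.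
import Mathlib
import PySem

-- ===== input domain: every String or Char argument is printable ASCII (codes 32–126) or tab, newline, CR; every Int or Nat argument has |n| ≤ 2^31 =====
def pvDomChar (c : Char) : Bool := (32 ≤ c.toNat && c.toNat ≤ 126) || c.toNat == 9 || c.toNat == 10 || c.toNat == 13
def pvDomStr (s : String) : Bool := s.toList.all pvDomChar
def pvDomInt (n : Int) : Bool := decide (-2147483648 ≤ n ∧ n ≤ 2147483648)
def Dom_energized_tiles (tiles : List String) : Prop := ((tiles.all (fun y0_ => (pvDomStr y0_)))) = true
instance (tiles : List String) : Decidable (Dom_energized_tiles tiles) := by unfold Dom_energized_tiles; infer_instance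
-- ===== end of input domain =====

-- B replaces A's single-beam walk with a `splits` backtracking stack by a Kleene fixpoint
-- iteration: repeatedly apply the whole-set one-step successor operator until the state set
-- is stable; same return value on Pre_.

-- a beam state (x, y, dx, dy), exactly the tuples Python puts in `seen`
abbrev pvSt : Type := Int × Int × Int × Int

def pvQ (c d : Int × Int) : pvSt := (c.1, c.2, d.1, d.2)

-- ===== fuel measures used by both ports (the Python loops terminate because the state
-- sets can only grow inside a finite state space; the fuel below is that bound) =====

def pvMaxC (l : List pvSt) : Int := l.foldr (fun s m => max (max (s.2.2.1.natAbs : Int) (s.2.2.2.natAbs : Int)) m) 1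


-- fuel: twice the size of the finite state space, + 1 (loops are run with this fuel;
-- the proofs below show it never runs out)
def pvFuel (cols rows M : Int) : Nat :=
  2 * (cols.toNat * (rows.toNat * ((2 * M + 1).toNat * (2 * M + 1).toNat))) + 1

-- ===== PORT A =====
-- tiles[curr[1]][curr[0]]; under the loop's bounds guard and Pre_ the lookups always succeed,
-- out of range (outside Pre_) the port reads '.'
def pvA_sq (tiles : List String) (x y : Int) : Char :=
  match PySem.List.pyGet? tiles y with
  | some r => (PySem.Str.pyGet? r x).getD '.'
  | none => '.'


-- the part of A's loop body after the pop: add to seen, read the tile, turn/split, advance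
def pvA_run (tiles : List String) (curr dir : Int × Int)
    (splits : List ((Int × Int) × (Int × Int))) (seen : PySem.Set pvSt) :
    (Int × Int) × (Int × Int) × List ((Int × Int) × (Int × Int)) × PySem.Set pvSt :=
  let seen' := PySem.Set.add seen (curr.1, curr.2, dir.1, dir.2)
  let sq := pvA_sq tiles curr.1 curr.2
  if sq = '\\' then
    ((curr.1 + dir.2, curr.2 + dir.1), (dir.2, dir.1), splits, seen')
  else if sq = '/' then
    ((curr.1 + -dir.2, curr.2 + -dir.1), (-dir.2, -dir.1), splits, seen')
  else if sq = '|' then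
    (if dir.1 ≠ 0 then
      ((curr.1 + 0, curr.2 + -dir.1), (0, -dir.1), splits ++ [(curr, (0, dir.1))], seen')
    else ((curr.1 + dir.1, curr.2 + dir.2), dir, splits, seen'))
  else if sq = '-' then
    (if dir.2 ≠ 0 then
      ((curr.1 + -dir.2, curr.2 + 0), (-dir.2, 0), splits ++ [(curr, (dir.2, 0))], seen')
    else ((curr.1 + dir.1, curr.2 + dir.2), dir, splits, seen'))
  else ((curr.1 + dir.1, curr.2 + dir.2), dir, splits, seen')

-- one iteration of A's `while True`: `none` = break, otherwise the next loop state
def pvA_body (tiles : List String) (cols rows : Int) (curr dir : Int × Int)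
    (splits : List ((Int × Int) × (Int × Int))) (seen : PySem.Set pvSt) :
    Option ((Int × Int) × (Int × Int) × List ((Int × Int) × (Int × Int)) × PySem.Set pvSt) :=
  if ¬ (0 ≤ curr.1 ∧ curr.1 < cols) ∨ ¬ (0 ≤ curr.2 ∧ curr.2 < rows) ∨
      PySem.Set.contains seen (curr.1, curr.2, dir.1, dir.2) then
    match splits.getLast? with
    | none => none
    | some p => some (pvA_run tiles p.1 p.2 splits.dropLast seen)
  else some (pvA_run tiles curr dir splits seen)


def pvA_loopF (tiles : List String) (cols rows : Int) :
    Nat → (Int × Int) → (Int × Int) → List ((Int × Int) × (Int × Int)) → PySem.Set pvSt →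
      PySem.Set pvSt
  | 0, _, _, _, seen => seen
  | n + 1, curr, dir, splits, seen =>
    match pvA_body tiles cols rows curr dir splits seen with
    | none => seen
    | some st => pvA_loopF tiles cols rows n st.1 st.2.1 st.2.2.1 st.2.2.2

def pvA_loop (tiles : List String) (cols rows : Int) (curr dir : Int × Int)
    (splits : List ((Int × Int) × (Int × Int))) (seen : PySem.Set pvSt) : PySem.Set pvSt :=
  pvA_loopF tiles cols rows
    (pvFuel cols rows (pvMaxC (pvQ curr dir :: (splits.map (fun p => pvQ p.1 p.2) ++ seen))))
    curr dir splits seen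

def energized_tiles (tiles : List String) : Int :=
  let rows : Int := tiles.length
  let cols : Int := PySem.Str.len ((PySem.List.pyGet? tiles 0).getD "")
  let starts : List pvSt :=
    (PySem.List.pyRange 0 rows).map (fun x => ((0 : Int), x, (1 : Int), (0 : Int)))
    ++ (PySem.List.pyRange 0 rows).map (fun x => (cols - 1, x, (-1 : Int), (0 : Int)))
    ++ (PySem.List.pyRange 0 cols).map (fun x => (x, (0 : Int), (0 : Int), (1 : Int)))
    ++ (PySem.List.pyRange 0 cols).map (fun x => (x, rows - 1, (0 : Int), (-1 : Int)))
  starts.foldl (fun most s =>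
    let seen := pvA_loop tiles cols rows (s.1, s.2.1) (s.2.2.1, s.2.2.2) [] PySem.Set.empty
    max most (PySem.Set.len (PySem.Set.ofList (seen.map (fun t => (t.1, t.2.1)))))) 0

-- ===== PORT B =====
def pvB_sq (tiles : List String) (x y : Int) : Char :=
  match PySem.List.pyGet? tiles y with
  | some r => (PySem.Str.pyGet? r x).getD '.'
  | none => '.'

-- `outgoing(ch, dx, dy)` of Source B
def pvB_out (ch : Char) (dx dy : Int) : List (Int × Int) :=
  if ch = '\\' then [(dy, dx)]
  else if ch = '/' then [(-dy, -dx)]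
  else if ch = '|' ∧ dx ≠ 0 then [(0, 1), (0, -1)]
  else if ch = '-' ∧ dy ≠ 0 then [(1, 0), (-1, 0)]
  else [(dx, dy)]

-- the body of `step`'s inner loop: conditionally add the advanced beam
def pvB_add1 (cols rows : Int) (s : pvSt) (out : PySem.Set pvSt) (d : Int × Int) : PySem.Set pvSt :=
  if 0 ≤ s.1 + d.1 ∧ s.1 + d.1 < cols ∧ 0 ≤ s.2.1 + d.2 ∧ s.2.1 + d.2 < rows then
    PySem.Set.add out (s.1 + d.1, s.2.1 + d.2, d.1, d.2)
  else out

-- `step(states)` of Source B: out = set(states), then add every in-bounds successor beam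
def pvB_step (tiles : List String) (cols rows : Int) (states : PySem.Set pvSt) : PySem.Set pvSt :=
  states.foldl (fun out s =>
    (pvB_out (pvB_sq tiles s.1 s.2.1) s.2.2.1 s.2.2.2).foldl (pvB_add1 cols rows s) out) states


-- Source B's `while True: nxt = step(seen); if nxt == seen: break; seen = nxt`
def pvB_iterF (tiles : List String) (cols rows : Int) :
    Nat → PySem.Set pvSt → PySem.Set pvSt
  | 0, seen => seen
  | n + 1, seen =>
    if PySem.Set.equal (pvB_step tiles cols rows seen) seen then seen
    else pvB_iterF tiles cols rows n (pvB_step tiles cols rows seen)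

def pvB_iter (tiles : List String) (cols rows : Int) (seen : PySem.Set pvSt) : PySem.Set pvSt :=
  pvB_iterF tiles cols rows (pvFuel cols rows (pvMaxC seen)) seen

def energized_tiles_alt (tiles : List String) : Int :=
  let rows : Int := tiles.length
  let cols : Int := PySem.Str.len ((PySem.List.pyGet? tiles 0).getD "")
  let starts : List pvSt :=
    (PySem.List.pyRange 0 rows).map (fun y => ((0 : Int), y, (1 : Int), (0 : Int)))
    ++ (PySem.List.pyRange 0 rows).map (fun y => (cols - 1, y, (-1 : Int), (0 : Int)))
    ++ (PySem.List.pyRange 0 cols).map (fun x => (x, (0 : Int), (0 : Int), (1 : Int)))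
    ++ (PySem.List.pyRange 0 cols).map (fun x => (x, rows - 1, (0 : Int), (-1 : Int)))
  starts.foldl (fun best s =>
    let seen0 : PySem.Set pvSt :=
      if 0 ≤ s.1 ∧ s.1 < cols ∧ 0 ≤ s.2.1 ∧ s.2.1 < rows then
        PySem.Set.add PySem.Set.empty s
      else PySem.Set.empty
    let seen := pvB_iter tiles cols rows seen0
    max best (PySem.Set.len (PySem.Set.ofList (seen.map (fun t => (t.1, t.2.1)))))) 0

-- ===== PRECONDITION & SPEC =====
-- Pre_ excludes the empty grid and grids whose first row is longer than some later row:
-- on exactly those inputs Python A raises IndexError (len(tiles[0]) or tiles[y][x]).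
def Pre_energized_tiles (tiles : List String) : Prop :=
  tiles ≠ [] ∧ ∀ t ∈ tiles, PySem.Str.len ((PySem.List.pyGet? tiles 0).getD "") ≤ PySem.Str.len t
instance (tiles : List String) : Decidable (Pre_energized_tiles tiles) := by
  unfold Pre_energized_tiles; infer_instance

def pvWitness_energized_tiles : List String := [".\\", "|."]

def Spec_energized_tiles (tiles : List String) (out : Int) : Prop := out = energized_tiles_alt tiles
instance (tiles : List String) (out : Int) : Decidable (Spec_energized_tiles tiles out) := by
  unfold Spec_energized_tiles; infer_instance

-- ===== CLAIM (what is proved, stated in full; the proofs are below) =====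
def Claim_equal_energized_tiles : Prop := ∀ (tiles : List String), Dom_energized_tiles tiles → Pre_energized_tiles tiles → Spec_energized_tiles tiles (energized_tiles tiles)

-- ===== LEMMAS AND PROOFS =====

noncomputable def pvSpace (cols rows M : Int) : Finset pvSt :=
  (Finset.Icc 0 (cols - 1)) ×ˢ (Finset.Icc 0 (rows - 1)) ×ˢ (Finset.Icc (-M) M) ×ˢ (Finset.Icc (-M) M)

noncomputable def pvCard (cols rows M : Int) (seen : List pvSt) : Nat :=
  ((pvSpace cols rows M) \ seen.toFinset).card

-- weight 2 for a pending beam that will push onto `splits` when processed, else 1 (measure only)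
def pvA_wt (tiles : List String) (p : (Int × Int) × (Int × Int)) : Nat :=
  if (pvA_sq tiles p.1.1 p.1.2 = '|' ∧ p.2.1 ≠ 0) ∨ (pvA_sq tiles p.1.1 p.1.2 = '-' ∧ p.2.2 ≠ 0)
  then 2 else 1

def pvA_W (tiles : List String) (splits : List ((Int × Int) × (Int × Int))) : Nat :=
  (splits.map (pvA_wt tiles)).sum

noncomputable def pvA_meas (tiles : List String) (cols rows : Int) (curr dir : Int × Int)
    (splits : List ((Int × Int) × (Int × Int))) (seen : List pvSt) : Nat :=
  2 * pvCard cols rows (pvMaxC (pvQ curr dir :: (splits.map (fun p => pvQ p.1 p.2) ++ seen))) seen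
    + pvA_W tiles splits

def pvBnd (M : Int) (s : pvSt) : Prop := (s.2.2.1.natAbs : Int) ≤ M ∧ (s.2.2.2.natAbs : Int) ≤ M

theorem one_le_pvMaxC (l : List pvSt) : 1 ≤ pvMaxC l := by
  induction l with
  | nil => simp [pvMaxC]
  | cons s t ih => simp only [pvMaxC, List.foldr] at ih ⊢; omega

theorem pvMaxC_mem {l : List pvSt} {s : pvSt} (h : s ∈ l) : pvBnd (pvMaxC l) s := by
  induction l with
  | nil => cases h
  | cons a t ih =>
    rcases List.mem_cons.1 h with rfl | h'
    · constructor <;> (simp only [pvMaxC, List.foldr, pvBnd]; omega)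
    · have := ih h'
      simp only [pvMaxC, List.foldr, pvBnd] at this ⊢
      omega

theorem pvMaxC_le {l' l : List pvSt} (h : ∀ s ∈ l', pvBnd (pvMaxC l) s) :
    pvMaxC l' ≤ pvMaxC l := by
  induction l' with
  | nil => exact one_le_pvMaxC l
  | cons a t ih =>
    have ha := h a (by simp)
    have ht := ih (fun s hs => h s (by simp [hs]))
    simp only [pvMaxC, List.foldr, pvBnd] at ha ht ⊢
    omega

theorem mem_pvSpace {cols rows M : Int} {s : pvSt} :
    s ∈ pvSpace cols rows M ↔
      (0 ≤ s.1 ∧ s.1 < cols) ∧ (0 ≤ s.2.1 ∧ s.2.1 < rows) ∧ pvBnd M s := by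
  obtain ⟨x, y, dx, dy⟩ := s
  simp only [pvSpace, pvBnd, Finset.mem_product, Finset.mem_Icc]
  omega

theorem pvCard_mono {cols rows M' M : Int} {seen' seen : List pvSt}
    (hM : M' ≤ M) (hs : ∀ x ∈ seen, x ∈ seen') :
    pvCard cols rows M' seen' ≤ pvCard cols rows M seen := by
  apply Finset.card_le_card
  intro x hx
  rcases Finset.mem_sdiff.1 hx with ⟨hsp, hns⟩
  refine Finset.mem_sdiff.2 ⟨?_, ?_⟩
  · rcases mem_pvSpace.1 hsp with ⟨h1, h2, h3, h4⟩
    exact mem_pvSpace.2 ⟨h1, h2, by constructor <;> omega⟩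
  · intro hmem
    exact hns (List.mem_toFinset.2 (hs x (List.mem_toFinset.1 hmem)))

theorem pvCard_lt {cols rows M' M : Int} {seen' seen : List pvSt} {q : pvSt}
    (hM : M' ≤ M) (hs : ∀ x ∈ seen, x ∈ seen')
    (hq : q ∈ pvSpace cols rows M) (hqn : q ∉ seen) (hqi : q ∈ seen') :
    pvCard cols rows M' seen' < pvCard cols rows M seen := by
  apply Finset.card_lt_card
  constructor
  · intro x hx
    rcases Finset.mem_sdiff.1 hx with ⟨hsp, hns⟩
    refine Finset.mem_sdiff.2 ⟨?_, ?_⟩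
    · rcases mem_pvSpace.1 hsp with ⟨h1, h2, h3, h4⟩
      exact mem_pvSpace.2 ⟨h1, h2, by constructor <;> omega⟩
    · intro hmem
      exact hns (List.mem_toFinset.2 (hs x (List.mem_toFinset.1 hmem)))
  · intro hsub
    have hq1 : q ∈ pvSpace cols rows M \ seen.toFinset :=
      Finset.mem_sdiff.2 ⟨hq, fun h => hqn (List.mem_toFinset.1 h)⟩
    have := hsub hq1
    exact (Finset.mem_sdiff.1 this).2 (List.mem_toFinset.2 hqi)

theorem pvSpace_card (cols rows M : Int) :
    (pvSpace cols rows M).card =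
      cols.toNat * (rows.toNat * ((2 * M + 1).toNat * (2 * M + 1).toNat)) := by
  simp only [pvSpace, Finset.card_product, Int.card_Icc]
  have h1 : cols - 1 + 1 - 0 = cols := by ring
  have h2 : rows - 1 + 1 - 0 = rows := by ring
  have h3 : M + 1 - -M = 2 * M + 1 := by ring
  rw [h1, h2, h3]

theorem pvCard_lt_fuel (cols rows M : Int) (seen : List pvSt) :
    pvCard cols rows M seen < pvFuel cols rows M := by
  have h : pvCard cols rows M seen ≤ (pvSpace cols rows M).card :=
    Finset.card_le_card Finset.sdiff_subset
  have h2 := pvSpace_card cols rows M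
  unfold pvFuel
  omega

theorem pvA_meas_lt_fuel (tiles : List String) (cols rows : Int) (curr dir : Int × Int) :
    pvA_meas tiles cols rows curr dir [] PySem.Set.empty <
      pvFuel cols rows
        (pvMaxC (pvQ curr dir ::
          (([] : List ((Int × Int) × (Int × Int))).map (fun p => pvQ p.1 p.2) ++
            PySem.Set.empty))) := by
  simp only [pvA_meas, pvA_W, List.map_nil, List.nil_append, List.sum_nil]
  have h : pvCard cols rows (pvMaxC (pvQ curr dir :: PySem.Set.empty)) PySem.Set.empty ≤
      (pvSpace cols rows (pvMaxC (pvQ curr dir :: PySem.Set.empty))).card :=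
    Finset.card_le_card Finset.sdiff_subset
  have h2 := pvSpace_card cols rows (pvMaxC (pvQ curr dir :: PySem.Set.empty))
  unfold pvFuel
  omega

theorem pvA_wt_one_le (tiles : List String) (p : (Int × Int) × (Int × Int)) :
    1 ≤ pvA_wt tiles p := by
  unfold pvA_wt; split_ifs <;> omega

theorem pvA_wt_le_two (tiles : List String) (p : (Int × Int) × (Int × Int)) :
    pvA_wt tiles p ≤ 2 := by
  unfold pvA_wt; split_ifs <;> omega

theorem pvA_W_append (tiles : List String) (l : List ((Int × Int) × (Int × Int)))
    (p : (Int × Int) × (Int × Int)) :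
    pvA_W tiles (l ++ [p]) = pvA_W tiles l + pvA_wt tiles p := by
  simp [pvA_W]

theorem pvA_maxC_step (c d c' d' : Int × Int) (sp sp' : List ((Int × Int) × (Int × Int)))
    (seen : List pvSt)
    (hd' : pvBnd (pvMaxC (pvQ c d :: (sp.map (fun p => pvQ p.1 p.2) ++ seen))) (pvQ c' d'))
    (hsp' : ∀ p ∈ sp', pvBnd (pvMaxC (pvQ c d :: (sp.map (fun p => pvQ p.1 p.2) ++ seen)))
      (pvQ p.1 p.2)) :
    pvMaxC (pvQ c' d' :: (sp'.map (fun p => pvQ p.1 p.2) ++ PySem.Set.add seen (c.1, c.2, d.1, d.2))) ≤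
    pvMaxC (pvQ c d :: (sp.map (fun p => pvQ p.1 p.2) ++ seen)) := by
  apply pvMaxC_le
  intro t ht
  simp only [List.mem_cons, List.mem_append, List.mem_map] at ht
  rcases ht with rfl | (⟨q, hq, rfl⟩ | ht)
  · exact hd'
  · exact hsp' q hq
  · rcases (PySem.Set.mem_add seen _ t).1 ht with ht' | rfl
    · exact pvMaxC_mem (by simp [ht'])
    · exact pvMaxC_mem (by simp [pvQ])

theorem pvA_run_seen (tiles : List String) (c d : Int × Int)
    (sp : List ((Int × Int) × (Int × Int))) (seen : PySem.Set pvSt) :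
    (pvA_run tiles c d sp seen).2.2.2 = PySem.Set.add seen (c.1, c.2, d.1, d.2) := by
  simp only [pvA_run]
  split_ifs <;> rfl

theorem pvA_run_bounds (tiles : List String) (c d : Int × Int)
    (sp : List ((Int × Int) × (Int × Int))) (seen : PySem.Set pvSt) :
    pvMaxC (pvQ (pvA_run tiles c d sp seen).1 (pvA_run tiles c d sp seen).2.1 ::
        ((pvA_run tiles c d sp seen).2.2.1.map (fun p => pvQ p.1 p.2) ++
          (pvA_run tiles c d sp seen).2.2.2)) ≤
      pvMaxC (pvQ c d :: (sp.map (fun p => pvQ p.1 p.2) ++ seen)) ∧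
    pvA_W tiles (pvA_run tiles c d sp seen).2.2.1 + 1 ≤ pvA_W tiles sp + pvA_wt tiles (c, d) := by
  have hd : pvBnd (pvMaxC (pvQ c d :: (sp.map (fun p => pvQ p.1 p.2) ++ seen))) (pvQ c d) :=
    pvMaxC_mem (by simp)
  have h1M := one_le_pvMaxC (pvQ c d :: (sp.map (fun p => pvQ p.1 p.2) ++ seen))
  have hz : ((0 : Int).natAbs : Int) ≤ pvMaxC (pvQ c d :: (sp.map (fun p => pvQ p.1 p.2) ++ seen)) := by
    simp; omega
  have hn1 : ((-d.1).natAbs : Int) ≤ pvMaxC (pvQ c d :: (sp.map (fun p => pvQ p.1 p.2) ++ seen)) := by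
    rw [Int.natAbs_neg]; exact hd.1
  have hn2 : ((-d.2).natAbs : Int) ≤ pvMaxC (pvQ c d :: (sp.map (fun p => pvQ p.1 p.2) ++ seen)) := by
    rw [Int.natAbs_neg]; exact hd.2
  have hwt1 := pvA_wt_one_le tiles (c, d)
  have hsp : ∀ p ∈ sp, pvBnd (pvMaxC (pvQ c d :: (sp.map (fun p => pvQ p.1 p.2) ++ seen)))
      (pvQ p.1 p.2) := fun p hp =>
    pvMaxC_mem (List.mem_cons_of_mem _ (List.mem_append_left _ (List.mem_map_of_mem hp)))
  simp only [pvA_run]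
  split_ifs with h1 h2 h3 h4 h5 h6 <;>
    refine ⟨pvA_maxC_step c d _ _ sp _ seen ?_ ?_, ?_⟩ <;> (try dsimp only)
  · exact ⟨hd.2, hd.1⟩
  · exact hsp
  · omega
  · exact ⟨hn2, hn1⟩
  · exact hsp
  · omega
  · exact ⟨hz, hn1⟩
  · intro p hp
    rcases List.mem_append.1 hp with hp' | hp'
    · exact hsp p hp'
    · simp only [List.mem_singleton] at hp'; subst hp'
      exact ⟨hz, hd.1⟩
  · have hW := pvA_W_append tiles sp (c, (0, d.1))
    have he : pvA_wt tiles (c, (0, d.1)) = 1 := by simp [pvA_wt, h3]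
    have hc2 : pvA_wt tiles (c, d) = 2 := by simp [pvA_wt, h3, h4]
    omega
  · exact hd
  · exact hsp
  · omega
  · exact ⟨hn2, hz⟩
  · intro p hp
    rcases List.mem_append.1 hp with hp' | hp'
    · exact hsp p hp'
    · simp only [List.mem_singleton] at hp'; subst hp'
      exact ⟨hd.2, hz⟩
  · have hW := pvA_W_append tiles sp (c, (d.2, 0))
    have he : pvA_wt tiles (c, (d.2, 0)) = 1 := by simp [pvA_wt, h5]
    have hc2 : pvA_wt tiles (c, d) = 2 := by simp [pvA_wt, h5, h6]
    omega
  · exact hd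
  · exact hsp
  · omega
  · exact hd
  · exact hsp
  · omega

theorem pvA_run_le (tiles : List String) (cols rows : Int) (c d : Int × Int)
    (sp : List ((Int × Int) × (Int × Int))) (seen : PySem.Set pvSt) :
    pvA_meas tiles cols rows (pvA_run tiles c d sp seen).1 (pvA_run tiles c d sp seen).2.1
      (pvA_run tiles c d sp seen).2.2.1 (pvA_run tiles c d sp seen).2.2.2 + 1 ≤
    pvA_meas tiles cols rows c d sp seen + pvA_wt tiles (c, d) := by
  obtain ⟨hM, hW⟩ := pvA_run_bounds tiles c d sp seen
  have hseen := pvA_run_seen tiles c d sp seen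
  have hc : pvCard cols rows
      (pvMaxC (pvQ (pvA_run tiles c d sp seen).1 (pvA_run tiles c d sp seen).2.1 ::
        ((pvA_run tiles c d sp seen).2.2.1.map (fun p => pvQ p.1 p.2) ++
          (pvA_run tiles c d sp seen).2.2.2)))
      (pvA_run tiles c d sp seen).2.2.2 ≤
      pvCard cols rows (pvMaxC (pvQ c d :: (sp.map (fun p => pvQ p.1 p.2) ++ seen))) seen := by
    refine pvCard_mono hM ?_
    intro x hx
    rw [hseen]
    exact (PySem.Set.mem_add seen _ x).2 (Or.inl hx)
  simp only [pvA_meas]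
  omega

theorem pvA_run_lt (tiles : List String) (cols rows : Int) (c d : Int × Int)
    (sp : List ((Int × Int) × (Int × Int))) (seen : PySem.Set pvSt)
    (hok : 0 ≤ c.1 ∧ c.1 < cols ∧ 0 ≤ c.2 ∧ c.2 < rows)
    (hns : (c.1, c.2, d.1, d.2) ∉ seen) :
    pvA_meas tiles cols rows (pvA_run tiles c d sp seen).1 (pvA_run tiles c d sp seen).2.1
      (pvA_run tiles c d sp seen).2.2.1 (pvA_run tiles c d sp seen).2.2.2 <
    pvA_meas tiles cols rows c d sp seen := by
  obtain ⟨hM, hW⟩ := pvA_run_bounds tiles c d sp seen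
  have hseen := pvA_run_seen tiles c d sp seen
  have hc : pvCard cols rows
      (pvMaxC (pvQ (pvA_run tiles c d sp seen).1 (pvA_run tiles c d sp seen).2.1 ::
        ((pvA_run tiles c d sp seen).2.2.1.map (fun p => pvQ p.1 p.2) ++
          (pvA_run tiles c d sp seen).2.2.2)))
      (pvA_run tiles c d sp seen).2.2.2 <
      pvCard cols rows (pvMaxC (pvQ c d :: (sp.map (fun p => pvQ p.1 p.2) ++ seen))) seen := by
    refine pvCard_lt hM ?_ ?_ hns ?_
    · intro x hx
      rw [hseen]
      exact (PySem.Set.mem_add seen _ x).2 (Or.inl hx)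
    · refine mem_pvSpace.2 ⟨⟨hok.1, hok.2.1⟩, ⟨hok.2.2.1, hok.2.2.2⟩, ?_⟩
      exact pvMaxC_mem (l := pvQ c d :: (sp.map (fun p => pvQ p.1 p.2) ++ seen)) (by simp [pvQ])
    · rw [hseen]
      exact (PySem.Set.mem_add seen _ _).2 (Or.inr rfl)
  simp only [pvA_meas]
  have hwt := pvA_wt_one_le tiles (c, d)
  have hwt2 := pvA_wt_le_two tiles (c, d)
  omega

theorem pvA_meas_pop (tiles : List String) (cols rows : Int) (curr dir : Int × Int)
    {splits : List ((Int × Int) × (Int × Int))} {p : (Int × Int) × (Int × Int)}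
    (seen : List pvSt) (h : splits.getLast? = some p) :
    pvA_meas tiles cols rows p.1 p.2 splits.dropLast seen + pvA_wt tiles p ≤
    pvA_meas tiles cols rows curr dir splits seen := by
  have hne : splits ≠ [] := by rintro rfl; simp at h
  have hp : splits.getLast hne = p := by
    rw [List.getLast?_eq_getLast hne] at h; exact Option.some.inj h
  have hsplit : splits.dropLast ++ [p] = splits := by
    rw [← hp]; exact List.dropLast_append_getLast hne
  have hW : pvA_W tiles splits = pvA_W tiles splits.dropLast + pvA_wt tiles p := by
    conv_lhs => rw [← hsplit]
    exact pvA_W_append tiles _ p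
  have hM : pvMaxC (pvQ p.1 p.2 :: (splits.dropLast.map (fun q => pvQ q.1 q.2) ++ seen)) ≤
      pvMaxC (pvQ curr dir :: (splits.map (fun q => pvQ q.1 q.2) ++ seen)) := by
    apply pvMaxC_le
    intro t ht
    apply pvMaxC_mem
    simp only [List.mem_cons, List.mem_append, List.mem_map] at ht ⊢
    rcases ht with rfl | (⟨q, hq, rfl⟩ | ht)
    · have : p ∈ splits := by rw [← hsplit]; simp
      exact Or.inr (Or.inl ⟨p, this, rfl⟩)
    · exact Or.inr (Or.inl ⟨q, List.mem_of_mem_dropLast hq, rfl⟩)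
    · exact Or.inr (Or.inr ht)
  have hc := pvCard_mono (cols := cols) (rows := rows) (seen := seen) (seen' := seen)
    hM (fun x hx => hx)
  simp only [pvA_meas]
  omega

theorem pvA_body_dec {tiles : List String} {cols rows : Int} {curr dir : Int × Int}
    {splits : List ((Int × Int) × (Int × Int))} {seen : PySem.Set pvSt}
    {st : (Int × Int) × (Int × Int) × List ((Int × Int) × (Int × Int)) × PySem.Set pvSt}
    (h : pvA_body tiles cols rows curr dir splits seen = some st) :
    pvA_meas tiles cols rows st.1 st.2.1 st.2.2.1 st.2.2.2 <
      pvA_meas tiles cols rows curr dir splits seen := by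
  unfold pvA_body at h
  split_ifs at h with hstop
  · cases hl : splits.getLast? with
    | none => rw [hl] at h; cases h
    | some p =>
      rw [hl] at h
      have hst := Option.some.inj h
      subst hst
      have h1 := pvA_run_le tiles cols rows p.1 p.2 splits.dropLast seen
      have h2 := pvA_meas_pop tiles cols rows curr dir seen hl
      have : (p.1, p.2) = p := rfl
      rw [this] at h1
      omega
  · have hst := Option.some.inj h
    subst hst
    rcases not_or.1 hstop with ⟨ha, hrest⟩
    rcases not_or.1 hrest with ⟨hb, hcont⟩
    refine pvA_run_lt tiles cols rows curr dir splits seen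
      ⟨(not_not.1 ha).1, (not_not.1 ha).2, (not_not.1 hb).1, (not_not.1 hb).2⟩ ?_
    exact fun hm => hcont ((PySem.Set.contains_iff _ _).2 hm)

theorem pvB_out_bnd (ch : Char) (dx dy : Int) :
    ∀ d ∈ pvB_out ch dx dy,
      d.1.natAbs ≤ max 1 (max dx.natAbs dy.natAbs) ∧
      d.2.natAbs ≤ max 1 (max dx.natAbs dy.natAbs) := by
  intro d hd
  unfold pvB_out at hd
  split_ifs at hd <;> simp at hd <;>
    first
      | (rcases hd with rfl | rfl <;> simp [Int.natAbs_neg] <;> omega)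
      | (subst hd; simp [Int.natAbs_neg] <;> omega)

theorem pvB_add1_mem (cols rows : Int) (s : pvSt) (out : PySem.Set pvSt) (d : Int × Int)
    (x : pvSt) :
    x ∈ pvB_add1 cols rows s out d ↔ x ∈ out ∨
      ((0 ≤ s.1 + d.1 ∧ s.1 + d.1 < cols ∧ 0 ≤ s.2.1 + d.2 ∧ s.2.1 + d.2 < rows) ∧
        x = (s.1 + d.1, s.2.1 + d.2, d.1, d.2)) := by
  unfold pvB_add1
  split_ifs with h
  · rw [PySem.Set.mem_add]; tauto
  · tauto

theorem pvB_inner_mem (cols rows : Int) (s : pvSt) :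
    ∀ (l : List (Int × Int)) (out : PySem.Set pvSt) (x : pvSt),
      x ∈ l.foldl (pvB_add1 cols rows s) out ↔ x ∈ out ∨
        ∃ d ∈ l, (0 ≤ s.1 + d.1 ∧ s.1 + d.1 < cols ∧ 0 ≤ s.2.1 + d.2 ∧ s.2.1 + d.2 < rows) ∧
          x = (s.1 + d.1, s.2.1 + d.2, d.1, d.2) := by
  intro l
  induction l with
  | nil => simp
  | cons d t ih =>
    intro out x
    simp only [List.foldl_cons, ih, pvB_add1_mem, List.mem_cons]
    constructor
    · rintro ((h | h) | ⟨e, he, hc⟩)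
      · exact Or.inl h
      · exact Or.inr ⟨d, Or.inl rfl, h⟩
      · exact Or.inr ⟨e, Or.inr he, hc⟩
    · rintro (h | ⟨e, (rfl | he), hc⟩)
      · exact Or.inl (Or.inl h)
      · exact Or.inl (Or.inr hc)
      · exact Or.inr ⟨e, he, hc⟩

theorem pvB_step_mem (tiles : List String) (cols rows : Int) (states : PySem.Set pvSt)
    (x : pvSt) :
    x ∈ pvB_step tiles cols rows states ↔ x ∈ states ∨
      ∃ s ∈ states, ∃ d ∈ pvB_out (pvB_sq tiles s.1 s.2.1) s.2.2.1 s.2.2.2,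
        (0 ≤ s.1 + d.1 ∧ s.1 + d.1 < cols ∧ 0 ≤ s.2.1 + d.2 ∧ s.2.1 + d.2 < rows) ∧
          x = (s.1 + d.1, s.2.1 + d.2, d.1, d.2) := by
  unfold pvB_step
  have key : ∀ (l : List pvSt) (out : PySem.Set pvSt),
      x ∈ l.foldl (fun out s =>
        (pvB_out (pvB_sq tiles s.1 s.2.1) s.2.2.1 s.2.2.2).foldl (pvB_add1 cols rows s) out) out ↔
      x ∈ out ∨ ∃ s ∈ l, ∃ d ∈ pvB_out (pvB_sq tiles s.1 s.2.1) s.2.2.1 s.2.2.2,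
        (0 ≤ s.1 + d.1 ∧ s.1 + d.1 < cols ∧ 0 ≤ s.2.1 + d.2 ∧ s.2.1 + d.2 < rows) ∧
          x = (s.1 + d.1, s.2.1 + d.2, d.1, d.2) := by
    intro l
    induction l with
    | nil => simp
    | cons s t ih =>
      intro out
      simp only [List.foldl_cons, ih, pvB_inner_mem, List.mem_cons]
      constructor
      · rintro ((h | ⟨d, hd, hc⟩) | ⟨u, hu, hrest⟩)
        · exact Or.inl h
        · exact Or.inr ⟨s, Or.inl rfl, d, hd, hc⟩
        · exact Or.inr ⟨u, Or.inr hu, hrest⟩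
      · rintro (h | ⟨u, (rfl | hu), hrest⟩)
        · exact Or.inl (Or.inl h)
        · exact Or.inl (Or.inr hrest)
        · exact Or.inr ⟨u, hu, hrest⟩
  exact key states states

theorem pvB_step_superset (tiles : List String) (cols rows : Int) (states : PySem.Set pvSt) :
    ∀ x ∈ states, x ∈ pvB_step tiles cols rows states :=
  fun x hx => (pvB_step_mem tiles cols rows states x).2 (Or.inl hx)

theorem pvB_step_maxC_le (tiles : List String) (cols rows : Int) (states : PySem.Set pvSt) :
    pvMaxC (pvB_step tiles cols rows states) ≤ pvMaxC states := by
  apply pvMaxC_le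
  intro t ht
  rcases (pvB_step_mem tiles cols rows states t).1 ht with h | ⟨s, hs, d, hd, _, rfl⟩
  · exact pvMaxC_mem h
  · have hb := pvB_out_bnd (pvB_sq tiles s.1 s.2.1) s.2.2.1 s.2.2.2 d hd
    have hsb := pvMaxC_mem hs
    have h1 := one_le_pvMaxC states
    simp only [pvBnd] at hsb ⊢
    omega

-- ¬(nxt == seen) yields a strictly smaller remaining state space (cited by pvB_iter)
theorem pvB_iter_dec (tiles : List String) (cols rows : Int) (seen : PySem.Set pvSt)
    (h : ¬ PySem.Set.equal (pvB_step tiles cols rows seen) seen = true) :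
    pvCard cols rows (pvMaxC (pvB_step tiles cols rows seen)) (pvB_step tiles cols rows seen) <
      pvCard cols rows (pvMaxC seen) seen := by
  have hsup := pvB_step_superset tiles cols rows seen
  have hne : ¬ ∀ x, x ∈ pvB_step tiles cols rows seen ↔ x ∈ seen := by
    intro hall
    exact h ((PySem.Set.equal_iff _ _).2 hall)
  have hq : ∃ q, q ∈ pvB_step tiles cols rows seen ∧ q ∉ seen := by
    by_contra hno
    push_neg at hno
    exact hne (fun x => ⟨fun hx => hno x hx, fun hx => hsup x hx⟩)
  obtain ⟨q, hqi, hqn⟩ := hq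
  have hok : (0 ≤ q.1 ∧ q.1 < cols) ∧ (0 ≤ q.2.1 ∧ q.2.1 < rows) ∧ pvBnd (pvMaxC seen) q := by
    rcases (pvB_step_mem tiles cols rows seen q).1 hqi with h' | ⟨s, hs, d, hd, hc, rfl⟩
    · exact absurd h' hqn
    · have hb := pvB_out_bnd (pvB_sq tiles s.1 s.2.1) s.2.2.1 s.2.2.2 d hd
      have hsb := pvMaxC_mem hs
      have h1 := one_le_pvMaxC seen
      simp only [pvBnd] at hsb ⊢
      refine ⟨⟨hc.1, hc.2.1⟩, ⟨hc.2.2.1, hc.2.2.2⟩, ?_, ?_⟩ <;> omega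
  exact pvCard_lt (pvB_step_maxC_le tiles cols rows seen) hsup
    (mem_pvSpace.2 hok) hqn hqi

-- states within the grid
def pvOk (cols rows : Int) (s : pvSt) : Prop :=
  0 ≤ s.1 ∧ s.1 < cols ∧ 0 ≤ s.2.1 ∧ s.2.1 < rows

-- the states a processed beam hands on, A's version: the moved beam, plus (for a broadside
-- splitter) the unmoved split beam that A pushes on `splits`
def pvSuccA (tiles : List String) (s : pvSt) : List pvSt :=
  let c := pvA_sq tiles s.1 s.2.1
  if c = '\\' then [(s.1 + s.2.2.2, s.2.1 + s.2.2.1, s.2.2.2, s.2.2.1)]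
  else if c = '/' then [(s.1 + -s.2.2.2, s.2.1 + -s.2.2.1, -s.2.2.2, -s.2.2.1)]
  else if c = '|' then
    (if s.2.2.1 ≠ 0 then
      [(s.1 + 0, s.2.1 + -s.2.2.1, 0, -s.2.2.1), (s.1, s.2.1, 0, s.2.2.1)]
    else [(s.1 + s.2.2.1, s.2.1 + s.2.2.2, s.2.2.1, s.2.2.2)])
  else if c = '-' then
    (if s.2.2.2 ≠ 0 then
      [(s.1 + -s.2.2.2, s.2.1 + 0, -s.2.2.2, 0), (s.1, s.2.1, s.2.2.2, 0)]
    else [(s.1 + s.2.2.1, s.2.1 + s.2.2.2, s.2.2.1, s.2.2.2)])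
  else [(s.1 + s.2.2.1, s.2.1 + s.2.2.2, s.2.2.1, s.2.2.2)]

-- B's version: the moved beams Source B's step generates (before the bounds filter)
def pvSuccB (tiles : List String) (s : pvSt) : List pvSt :=
  (pvB_out (pvB_sq tiles s.1 s.2.1) s.2.2.1 s.2.2.2).map
    (fun d => (s.1 + d.1, s.2.1 + d.2, d.1, d.2))

-- reachability through in-grid states under a successor map
inductive pvReach (tiles : List String) (cols rows : Int)
    (succ : List String → pvSt → List pvSt) : pvSt → pvSt → Prop
  | refl (s : pvSt) : pvOk cols rows s → pvReach tiles cols rows succ s s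
  | step {s t u : pvSt} : pvReach tiles cols rows succ s t → u ∈ succ tiles t →
      pvOk cols rows u → pvReach tiles cols rows succ s u

theorem pvReach_ok {tiles cols rows succ} {s t : pvSt}
    (h : pvReach tiles cols rows succ s t) : pvOk cols rows t := by
  cases h with
  | refl h => exact h
  | step _ _ h => exact h

theorem pvReach_root_ok {tiles cols rows succ} {s t : pvSt}
    (h : pvReach tiles cols rows succ s t) : pvOk cols rows s := by
  induction h with
  | refl h => exact h
  | step _ _ _ ih => exact ih

theorem pvReach_trans {tiles cols rows succ} {a b c : pvSt}
    (h1 : pvReach tiles cols rows succ a b) (h2 : pvReach tiles cols rows succ b c) :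
    pvReach tiles cols rows succ a c := by
  induction h2 with
  | refl _ => exact h1
  | step _ hu hok ih => exact pvReach.step ih hu hok

theorem pvReach_escape {tiles : List String} {cols rows : Int}
    {succ : List String → pvSt → List pvSt} {seen G : List pvSt}
    (hcl : ∀ s ∈ seen, ∀ t ∈ succ tiles s, pvOk cols rows t → t ∈ seen ∨ t ∈ G)
    {f x : pvSt} (hf : f ∈ seen) (hr : pvReach tiles cols rows succ f x) :
    x ∈ seen ∨ ∃ g ∈ G, pvReach tiles cols rows succ g x := by
  induction hr with
  | refl _ => exact Or.inl hf
  | step _ hu hok ih =>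
    rcases ih with hx | ⟨g, hg, hgr⟩
    · rcases hcl _ hx _ hu hok with h | h
      · exact Or.inl h
      · exact Or.inr ⟨_, h, pvReach.refl _ hok⟩
    · exact Or.inr ⟨g, hg, pvReach.step hgr hu hok⟩

-- ---- characterization of B's fixpoint iteration ----
-- pvB_step membership, phrased through pvSuccB and pvOk
theorem pvB_step_mem' (tiles : List String) (cols rows : Int) (states : PySem.Set pvSt)
    (x : pvSt) :
    x ∈ pvB_step tiles cols rows states ↔ x ∈ states ∨
      ∃ s ∈ states, x ∈ pvSuccB tiles s ∧ pvOk cols rows x := by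
  rw [pvB_step_mem]
  constructor
  · rintro (h | ⟨s, hs, d, hd, hc, rfl⟩)
    · exact Or.inl h
    · exact Or.inr ⟨s, hs, List.mem_map.2 ⟨d, hd, rfl⟩,
        ⟨hc.1, hc.2.1, hc.2.2.1, hc.2.2.2⟩⟩
  · rintro (h | ⟨s, hs, hx, hok⟩)
    · exact Or.inl h
    · rcases List.mem_map.1 hx with ⟨d, hd, rfl⟩
      exact Or.inr ⟨s, hs, d, hd, ⟨hok.1, hok.2.1, hok.2.2.1, hok.2.2.2⟩, rfl⟩

theorem pvB_iter_mem (tiles : List String) (cols rows : Int) :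
    ∀ n (seen : PySem.Set pvSt), pvCard cols rows (pvMaxC seen) seen < n →
      (∀ s ∈ seen, pvOk cols rows s) →
      ∀ x, x ∈ pvB_iterF tiles cols rows n seen ↔
        x ∈ seen ∨ ∃ f ∈ seen, pvReach tiles cols rows pvSuccB f x := by
  intro n
  induction n with
  | zero => intro seen hm; exact absurd hm (Nat.not_lt_zero _)
  | succ n ih =>
    intro seen hm hok x
    simp only [pvB_iterF]
    split_ifs with hfix
    · -- stable: step(seen) == seen, so seen is closed under in-bounds successors
      have hext := (PySem.Set.equal_iff _ _).1 hfix
      have hcl : ∀ s ∈ seen, ∀ t ∈ pvSuccB tiles s, pvOk cols rows t →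
          t ∈ seen ∨ t ∈ ([] : List pvSt) := by
        intro s hs t ht hto
        exact Or.inl ((hext t).1
          ((pvB_step_mem' tiles cols rows seen t).2 (Or.inr ⟨s, hs, ht, hto⟩)))
      constructor
      · exact fun h => Or.inl h
      · rintro (h | ⟨f, hf, hr⟩)
        · exact h
        · rcases pvReach_escape hcl hf hr with h' | ⟨g, hg, _⟩
          · exact h'
          · cases hg
    · have hdec := pvB_iter_dec tiles cols rows seen hfix
      have hok' : ∀ s ∈ pvB_step tiles cols rows seen, pvOk cols rows s := by
        intro s hs
        rcases (pvB_step_mem' tiles cols rows seen s).1 hs with h | ⟨_, _, _, h⟩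
        · exact hok s h
        · exact h
      rw [ih _ (by omega) hok' x]
      constructor
      · rintro (h | ⟨f, hf, hr⟩)
        · rcases (pvB_step_mem' tiles cols rows seen x).1 h with h' | ⟨s, hs, hx, hxo⟩
          · exact Or.inl h'
          · exact Or.inr ⟨s, hs, pvReach.step (pvReach.refl _ (hok s hs)) hx hxo⟩
        · rcases (pvB_step_mem' tiles cols rows seen f).1 hf with h' | ⟨s, hs, hfx, hfo⟩
          · exact Or.inr ⟨f, h', hr⟩
          · exact Or.inr ⟨s, hs, pvReach_trans
              (pvReach.step (pvReach.refl _ (hok s hs)) hfx hfo) hr⟩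
      · rintro (h | ⟨f, hf, hr⟩)
        · exact Or.inl (pvB_step_superset tiles cols rows seen x h)
        · exact Or.inr ⟨f, pvB_step_superset tiles cols rows seen f hf, hr⟩

theorem pvB_start_char (tiles : List String) (cols rows : Int) (s x : pvSt) :
    x ∈ pvB_iter tiles cols rows
        (if 0 ≤ s.1 ∧ s.1 < cols ∧ 0 ≤ s.2.1 ∧ s.2.1 < rows then
          PySem.Set.add PySem.Set.empty s
        else PySem.Set.empty) ↔
      pvReach tiles cols rows pvSuccB s x := by
  split_ifs with hokc
  · have hseen : ∀ t : pvSt, t ∈ PySem.Set.add PySem.Set.empty s ↔ t = s := by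
      intro t
      rw [PySem.Set.mem_add]
      simp [PySem.Set.empty]
    have hok : ∀ t ∈ PySem.Set.add PySem.Set.empty s, pvOk cols rows t := by
      intro t ht
      rw [hseen t] at ht
      subst ht
      exact ⟨hokc.1, hokc.2.1, hokc.2.2.1, hokc.2.2.2⟩
    rw [pvB_iter, pvB_iter_mem tiles cols rows _ _ (pvCard_lt_fuel _ _ _ _) hok x]
    constructor
    · rintro (h | ⟨f, hf, hr⟩)
      · rw [hseen x] at h
        subst h
        exact pvReach.refl _ ⟨hokc.1, hokc.2.1, hokc.2.2.1, hokc.2.2.2⟩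
      · rw [hseen f] at hf
        subst hf
        exact hr
    · intro hr
      exact Or.inr ⟨s, (hseen s).2 rfl, hr⟩
  · rw [pvB_iter, pvB_iter_mem tiles cols rows _ _ (pvCard_lt_fuel _ _ _ _) (by intro a ha; cases ha) x]
    simp only [PySem.Set.empty]
    constructor
    · rintro (h | ⟨f, hf, _⟩)
      · cases h
      · cases hf
    · intro hr
      exact absurd (pvReach_root_ok hr) (fun h => hokc ⟨h.1, h.2.1, h.2.2.1, h.2.2.2⟩)

-- ---- characterization of A's loop ----
-- every entry A pushes on `splits` sits on its splitter moving along it: processing it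
-- never pushes again and moves it straight on
def pvAligned (tiles : List String) (p : (Int × Int) × (Int × Int)) : Prop :=
  (pvA_sq tiles p.1.1 p.1.2 = '|' ∧ p.2.1 = 0) ∨ (pvA_sq tiles p.1.1 p.1.2 = '-' ∧ p.2.2 = 0)

theorem pvSet_add_mem {seen : PySem.Set pvSt} {q : pvSt} (h : q ∈ seen) :
    PySem.Set.add seen q = seen := by
  unfold PySem.Set.add
  rw [if_pos ((PySem.Set.contains_iff seen q).2 h)]

theorem pvA_run_aligned (tiles : List String) {p : (Int × Int) × (Int × Int)}
    (h : pvAligned tiles p) (sp : List ((Int × Int) × (Int × Int))) (seen : PySem.Set pvSt) :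
    pvA_run tiles p.1 p.2 sp seen =
      ((p.1.1 + p.2.1, p.1.2 + p.2.2), p.2, sp, PySem.Set.add seen (pvQ p.1 p.2)) := by
  rcases h with ⟨hsq, h0⟩ | ⟨hsq, h0⟩ <;> simp [pvA_run, pvQ, hsq, h0]

theorem pvSuccA_aligned (tiles : List String) {p : (Int × Int) × (Int × Int)}
    (h : pvAligned tiles p) :
    pvSuccA tiles (pvQ p.1 p.2) = [(p.1.1 + p.2.1, p.1.2 + p.2.2, p.2.1, p.2.2)] := by
  rcases h with ⟨hsq, h0⟩ | ⟨hsq, h0⟩ <;> simp [pvSuccA, pvQ, hsq, h0]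

theorem pvA_run_next (tiles : List String) (c d : Int × Int)
    (sp : List ((Int × Int) × (Int × Int))) (seen : PySem.Set pvSt) (t : pvSt) :
    (t = pvQ (pvA_run tiles c d sp seen).1 (pvA_run tiles c d sp seen).2.1 ∨
      t ∈ (pvA_run tiles c d sp seen).2.2.1.map (fun p => pvQ p.1 p.2)) ↔
    (t ∈ pvSuccA tiles (pvQ c d) ∨ t ∈ sp.map (fun p => pvQ p.1 p.2)) := by
  simp only [pvA_run, pvSuccA, pvQ]
  split_ifs <;> simp <;> aesop

theorem pvA_run_splits (tiles : List String) (c d : Int × Int)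
    (sp : List ((Int × Int) × (Int × Int))) (seen : PySem.Set pvSt) :
    ∀ p ∈ (pvA_run tiles c d sp seen).2.2.1, p ∈ sp ∨ (p.1 = c ∧ pvAligned tiles p) := by
  intro p hp
  simp only [pvA_run] at hp
  split_ifs at hp with h1 h2 h3 h4 h5 h6
  case _ => exact Or.inl hp
  case _ => exact Or.inl hp
  case _ =>
    rcases List.mem_append.1 hp with h | h
    · exact Or.inl h
    · simp only [List.mem_singleton] at h; subst h
      exact Or.inr ⟨rfl, Or.inl ⟨h3, rfl⟩⟩
  case _ => exact Or.inl hp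
  case _ =>
    rcases List.mem_append.1 hp with h | h
    · exact Or.inl h
    · simp only [List.mem_singleton] at h; subst h
      exact Or.inr ⟨rfl, Or.inr ⟨h5, rfl⟩⟩
  case _ => exact Or.inl hp
  case _ => exact Or.inl hp

theorem pvA_loop_mem (tiles : List String) (cols rows : Int) :
    ∀ n (curr dir : Int × Int) (splits : List ((Int × Int) × (Int × Int)))
      (seen : PySem.Set pvSt),
      pvA_meas tiles cols rows curr dir splits seen < n →
      (∀ s ∈ seen, pvOk cols rows s) →
      (∀ s ∈ seen, ∀ t ∈ pvSuccA tiles s, pvOk cols rows t →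
        t ∈ seen ∨ t ∈ pvQ curr dir :: splits.map (fun p => pvQ p.1 p.2)) →
      (∀ p ∈ splits, pvOk cols rows (pvQ p.1 p.2) ∧ pvAligned tiles p) →
      ∀ x, x ∈ pvA_loopF tiles cols rows n curr dir splits seen ↔
        x ∈ seen ∨ ∃ f ∈ pvQ curr dir :: splits.map (fun p => pvQ p.1 p.2),
          pvReach tiles cols rows pvSuccA f x := by
  intro n
  induction n with
  | zero => intro curr dir splits seen hm; exact absurd hm (Nat.not_lt_zero _)
  | succ n ih =>
    intro curr dir splits seen hm hok hcl hsp x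
    simp only [pvA_loopF]
    split
    next hb =>
      -- break: the condition held and splits was empty
      unfold pvA_body at hb
      split_ifs at hb with hstop
      · have hq : pvQ curr dir ∈ seen ∨ ¬ pvOk cols rows (pvQ curr dir) := by
          rcases hstop with h | h | h
          · exact Or.inr (fun hk => h ⟨hk.1, hk.2.1⟩)
          · exact Or.inr (fun hk => h ⟨hk.2.2.1, hk.2.2.2⟩)
          · exact Or.inl ((PySem.Set.contains_iff _ _).1 h)
        cases hl : splits.getLast? with
        | none =>
          have hnil : splits = [] := by
            cases splits with
            | nil => rfl
            | cons a t => simp at hl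
          subst hnil
          simp only [List.map_nil]
          have hcl0 : ∀ a ∈ seen, ∀ t ∈ pvSuccA tiles a, pvOk cols rows t →
              t ∈ seen ∨ t ∈ ([] : List pvSt) := by
            intro a ha t ht hto
            rcases hcl a ha t ht hto with h | h
            · exact Or.inl h
            · rcases List.mem_cons.1 h with h' | h'
              · subst h'
                rcases hq with hq | hq
                · exact Or.inl hq
                · exact absurd hto hq
              · cases h'
          constructor
          · exact fun h => Or.inl h
          · rintro (h | ⟨f, hf, hr⟩)
            · exact h
            · rcases List.mem_cons.1 hf with h' | h'
              · subst h'
                rcases hq with hq | hq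
                · rcases pvReach_escape hcl0 hq hr with h3 | ⟨g, hg, _⟩
                  · exact h3
                  · cases hg
                · exact absurd (pvReach_root_ok hr) hq
              · cases h'
        | some p => rw [hl] at hb; cases hb
    next st hb =>
      have hdec := pvA_body_dec hb
      have hdn : pvA_meas tiles cols rows st.1 st.2.1 st.2.2.1 st.2.2.2 < n := by omega
      unfold pvA_body at hb
      split_ifs at hb with hstop
      · -- condition held: pop the last split and process it
        have hq : pvQ curr dir ∈ seen ∨ ¬ pvOk cols rows (pvQ curr dir) := by
          rcases hstop with h | h | h
          · exact Or.inr (fun hk => h ⟨hk.1, hk.2.1⟩)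
          · exact Or.inr (fun hk => h ⟨hk.2.2.1, hk.2.2.2⟩)
          · exact Or.inl ((PySem.Set.contains_iff _ _).1 h)
        cases hl : splits.getLast? with
        | none => rw [hl] at hb; cases hb
        | some p =>
          rw [hl] at hb
          replace hb := (Option.some.inj hb).symm
          have hne : splits ≠ [] := by rintro rfl; simp at hl
          have hpl : splits.getLast hne = p := by
            rw [List.getLast?_eq_getLast hne] at hl; exact Option.some.inj hl
          have hsplit : splits.dropLast ++ [p] = splits := by
            rw [← hpl]; exact List.dropLast_append_getLast hne
          have hpmem : p ∈ splits := by rw [← hsplit]; simp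
          have hmap : splits.map (fun p => pvQ p.1 p.2) =
              splits.dropLast.map (fun p => pvQ p.1 p.2) ++ [pvQ p.1 p.2] := by
            rw [← hsplit]; simp
          obtain ⟨hpok, hpal⟩ := hsp p hpmem
          rw [pvA_run_aligned tiles hpal] at hb
          have hq'succ : (p.1.1 + p.2.1, p.1.2 + p.2.2, p.2.1, p.2.2) ∈
              pvSuccA tiles (pvQ p.1 p.2) := by
            rw [pvSuccA_aligned tiles hpal]; exact List.mem_singleton.2 rfl
          have hsp' : ∀ p' ∈ splits.dropLast,
              pvOk cols rows (pvQ p'.1 p'.2) ∧ pvAligned tiles p' :=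
            fun p' hp' => hsp p' (List.mem_of_mem_dropLast hp')
          by_cases hpseen : pvQ p.1 p.2 ∈ seen
          · rw [pvSet_add_mem hpseen] at hb
            subst hb
            have hcl' : ∀ a ∈ seen, ∀ t ∈ pvSuccA tiles a, pvOk cols rows t →
                t ∈ seen ∨ t ∈ pvQ (p.1.1 + p.2.1, p.1.2 + p.2.2) p.2 ::
                  splits.dropLast.map (fun p => pvQ p.1 p.2) := by
              intro a ha t ht hto
              rcases hcl a ha t ht hto with h | h
              · exact Or.inl h
              · rcases List.mem_cons.1 h with h' | h'
                · subst h'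
                  rcases hq with hq | hq
                  · exact Or.inl hq
                  · exact absurd hto hq
                · rw [hmap] at h'
                  rcases List.mem_append.1 h' with h'' | h''
                  · exact Or.inr (List.mem_cons_of_mem _ h'')
                  · simp only [List.mem_singleton] at h''; subst h''
                    exact Or.inl hpseen
            rw [ih _ _ _ _ hdn hok hcl' hsp' x]
            constructor
            · rintro (h | ⟨f, hf, hr⟩)
              · exact Or.inl h
              · rcases List.mem_cons.1 hf with h' | h'
                · subst h'
                  refine Or.inr ⟨pvQ p.1 p.2, ?_, ?_⟩
                  · exact List.mem_cons_of_mem _ (hmap ▸ List.mem_append_right _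
                      (List.mem_singleton.2 rfl))
                  · exact pvReach_trans
                      (pvReach.step (pvReach.refl _ hpok) hq'succ (pvReach_root_ok hr)) hr
                · exact Or.inr ⟨f, List.mem_cons_of_mem _ (hmap ▸ List.mem_append_left _ h'), hr⟩
            · rintro (h | ⟨f, hf, hr⟩)
              · exact Or.inl h
              · rcases List.mem_cons.1 hf with h' | h'
                · subst h'
                  rcases hq with hq | hq
                  · exact pvReach_escape hcl' hq hr
                  · exact absurd (pvReach_root_ok hr) hq
                · rw [hmap] at h'
                  rcases List.mem_append.1 h' with h'' | h''
                  · exact Or.inr ⟨f, List.mem_cons_of_mem _ h'', hr⟩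
                  · simp only [List.mem_singleton] at h''; subst h''
                    exact pvReach_escape hcl' hpseen hr
          · subst hb
            have hokp' : ∀ a ∈ PySem.Set.add seen (pvQ p.1 p.2), pvOk cols rows a := by
              intro a ha
              rcases (PySem.Set.mem_add _ _ a).1 ha with h | rfl
              · exact hok a h
              · exact hpok
            have hcl' : ∀ a ∈ PySem.Set.add seen (pvQ p.1 p.2),
                ∀ t ∈ pvSuccA tiles a, pvOk cols rows t →
                t ∈ PySem.Set.add seen (pvQ p.1 p.2) ∨
                  t ∈ pvQ (p.1.1 + p.2.1, p.1.2 + p.2.2) p.2 ::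
                    splits.dropLast.map (fun p => pvQ p.1 p.2) := by
              intro a ha t ht hto
              rcases (PySem.Set.mem_add _ _ a).1 ha with h | rfl
              · rcases hcl a h t ht hto with h' | h'
                · exact Or.inl ((PySem.Set.mem_add _ _ t).2 (Or.inl h'))
                · rcases List.mem_cons.1 h' with h'' | h''
                  · subst h''
                    rcases hq with hq | hq
                    · exact Or.inl ((PySem.Set.mem_add _ _ _).2 (Or.inl hq))
                    · exact absurd hto hq
                  · rw [hmap] at h''
                    rcases List.mem_append.1 h'' with h3 | h3
                    · exact Or.inr (List.mem_cons_of_mem _ h3)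
                    · simp only [List.mem_singleton] at h3; subst h3
                      exact Or.inl ((PySem.Set.mem_add _ _ _).2 (Or.inr rfl))
              · rw [pvSuccA_aligned tiles hpal] at ht
                simp only [List.mem_singleton] at ht; subst ht
                exact Or.inr List.mem_cons_self
            rw [ih _ _ _ _ hdn hokp' hcl' hsp' x]
            constructor
            · rintro (h | ⟨f, hf, hr⟩)
              · rcases (PySem.Set.mem_add _ _ x).1 h with h' | hx
                · exact Or.inl h'
                · rw [hx]
                  exact Or.inr ⟨pvQ p.1 p.2, List.mem_cons_of_mem _
                    (hmap ▸ List.mem_append_right _ (List.mem_singleton.2 rfl)),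
                    pvReach.refl _ hpok⟩
              · rcases List.mem_cons.1 hf with h' | h'
                · subst h'
                  refine Or.inr ⟨pvQ p.1 p.2, ?_, ?_⟩
                  · exact List.mem_cons_of_mem _ (hmap ▸ List.mem_append_right _
                      (List.mem_singleton.2 rfl))
                  · exact pvReach_trans
                      (pvReach.step (pvReach.refl _ hpok) hq'succ (pvReach_root_ok hr)) hr
                · exact Or.inr ⟨f, List.mem_cons_of_mem _ (hmap ▸ List.mem_append_left _ h'), hr⟩
            · rintro (h | ⟨f, hf, hr⟩)
              · exact Or.inl ((PySem.Set.mem_add _ _ x).2 (Or.inl h))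
              · rcases List.mem_cons.1 hf with h' | h'
                · subst h'
                  rcases hq with hq | hq
                  · exact pvReach_escape hcl' ((PySem.Set.mem_add _ _ _).2 (Or.inl hq)) hr
                  · exact absurd (pvReach_root_ok hr) hq
                · rw [hmap] at h'
                  rcases List.mem_append.1 h' with h'' | h''
                  · exact Or.inr ⟨f, List.mem_cons_of_mem _ h'', hr⟩
                  · simp only [List.mem_singleton] at h''; subst h''
                    exact pvReach_escape hcl' ((PySem.Set.mem_add _ _ _).2 (Or.inr rfl)) hr
      · -- condition did not hold: process the current beam
        replace hb := (Option.some.inj hb).symm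
        rcases not_or.1 hstop with ⟨h1, hrest⟩
        rcases not_or.1 hrest with ⟨h2, h3⟩
        have hokc : pvOk cols rows (pvQ curr dir) := by
          have a1 := not_not.1 h1
          have a2 := not_not.1 h2
          exact ⟨a1.1, a1.2, a2.1, a2.2⟩
        have hnsc : pvQ curr dir ∉ seen :=
          fun hm' => h3 ((PySem.Set.contains_iff _ _).2 hm')
        have hseen' : st.2.2.2 = PySem.Set.add seen (pvQ curr dir) := by
          rw [hb]; exact pvA_run_seen tiles curr dir splits seen
        have hnext : ∀ t : pvSt, (t = pvQ st.1 st.2.1 ∨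
            t ∈ st.2.2.1.map (fun p => pvQ p.1 p.2)) ↔
            (t ∈ pvSuccA tiles (pvQ curr dir) ∨ t ∈ splits.map (fun p => pvQ p.1 p.2)) := by
          intro t; rw [hb]; exact pvA_run_next tiles curr dir splits seen t
        have hspl : ∀ p' ∈ st.2.2.1, p' ∈ splits ∨ (p'.1 = curr ∧ pvAligned tiles p') := by
          rw [hb]; exact pvA_run_splits tiles curr dir splits seen
        have hok' : ∀ a ∈ st.2.2.2, pvOk cols rows a := by
          rw [hseen']
          intro a ha
          rcases (PySem.Set.mem_add _ _ a).1 ha with h | rfl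
          · exact hok a h
          · exact hokc
        have hcl' : ∀ a ∈ st.2.2.2, ∀ t ∈ pvSuccA tiles a, pvOk cols rows t →
            t ∈ st.2.2.2 ∨ t ∈ pvQ st.1 st.2.1 :: st.2.2.1.map (fun p => pvQ p.1 p.2) := by
          rw [hseen']
          intro a ha t ht hto
          rcases (PySem.Set.mem_add _ _ a).1 ha with h | rfl
          · rcases hcl a h t ht hto with h' | h'
            · exact Or.inl ((PySem.Set.mem_add _ _ t).2 (Or.inl h'))
            · rcases List.mem_cons.1 h' with h'' | h''
              · subst h''
                exact Or.inl ((PySem.Set.mem_add _ _ _).2 (Or.inr rfl))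
              · rcases List.mem_cons.1 (((hnext t).2 (Or.inr h'')).elim
                  (fun h4 => List.mem_cons.2 (Or.inl h4))
                  (fun h4 => List.mem_cons.2 (Or.inr h4))) with h5 | h5
                · exact Or.inr (List.mem_cons.2 (Or.inl h5))
                · exact Or.inr (List.mem_cons.2 (Or.inr h5))
          · rcases (hnext t).2 (Or.inl ht) with h' | h'
            · exact Or.inr (List.mem_cons.2 (Or.inl h'))
            · exact Or.inr (List.mem_cons.2 (Or.inr h'))
        have hsp'' : ∀ p' ∈ st.2.2.1, pvOk cols rows (pvQ p'.1 p'.2) ∧ pvAligned tiles p' := by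
          intro p' hp'
          rcases hspl p' hp' with h | ⟨hpc, hal⟩
          · exact hsp p' h
          · refine ⟨?_, hal⟩
            rw [hpc]
            exact ⟨hokc.1, hokc.2.1, hokc.2.2.1, hokc.2.2.2⟩
        rw [ih _ _ _ _ hdn hok' hcl' hsp'' x]
        constructor
        · rintro (h | ⟨f, hf, hr⟩)
          · rw [hseen'] at h
            rcases (PySem.Set.mem_add _ _ x).1 h with h' | hx
            · exact Or.inl h'
            · rw [hx]
              exact Or.inr ⟨pvQ curr dir, List.mem_cons_self, pvReach.refl _ hokc⟩
          · rcases (hnext f).1 (List.mem_cons.1 hf) with h' | h'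
            · refine Or.inr ⟨pvQ curr dir, List.mem_cons_self, pvReach_trans
                (pvReach.step (pvReach.refl _ hokc) h' (pvReach_root_ok hr)) hr⟩
            · exact Or.inr ⟨f, List.mem_cons_of_mem _ h', hr⟩
        · rintro (h | ⟨f, hf, hr⟩)
          · rw [hseen']
            exact Or.inl ((PySem.Set.mem_add _ _ x).2 (Or.inl h))
          · rcases List.mem_cons.1 hf with h' | h'
            · subst h'
              refine pvReach_escape hcl' ?_ hr
              rw [hseen']
              exact (PySem.Set.mem_add _ _ _).2 (Or.inr rfl)
            · exact Or.inr ⟨f, List.mem_cons.2 ((hnext f).2 (Or.inr h')), hr⟩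

theorem pvA_loop_char (tiles : List String) (cols rows : Int) (s : pvSt) (x : pvSt) :
    x ∈ pvA_loop tiles cols rows (s.1, s.2.1) (s.2.2.1, s.2.2.2) [] PySem.Set.empty ↔
      pvReach tiles cols rows pvSuccA s x := by
  rw [pvA_loop, pvA_loop_mem tiles cols rows _ (s.1, s.2.1) (s.2.2.1, s.2.2.2) [] PySem.Set.empty
    (pvA_meas_lt_fuel tiles cols rows _ _)
    (by intro a ha; cases ha) (by intro a ha; cases ha) (by intro p hp; cases hp) x]
  simp [PySem.Set.empty, pvQ]

-- ---- A and B reach the same grid positions ----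
theorem pvSq_eq : pvB_sq = pvA_sq := rfl

def pvUnit (s : pvSt) : Prop :=
  (s.2.2.1 = 1 ∧ s.2.2.2 = 0) ∨ (s.2.2.1 = -1 ∧ s.2.2.2 = 0) ∨
  (s.2.2.1 = 0 ∧ s.2.2.2 = 1) ∨ (s.2.2.1 = 0 ∧ s.2.2.2 = -1)

theorem pvUnit_succA {tiles : List String} {s t : pvSt} (h : pvUnit s)
    (ht : t ∈ pvSuccA tiles s) : pvUnit t := by
  simp only [pvSuccA] at ht
  split_ifs at ht <;> simp only [List.mem_singleton, List.mem_cons, List.not_mem_nil,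
    or_false] at ht <;>
    (rcases h with ⟨a, b⟩ | ⟨a, b⟩ | ⟨a, b⟩ | ⟨a, b⟩ <;>
      first
        | (subst ht; simp [pvUnit, a, b])
        | (exact absurd a ‹s.2.2.1 ≠ 0›)
        | (exact absurd b ‹s.2.2.2 ≠ 0›)
        | (rcases ht with rfl | rfl <;> simp [pvUnit, a, b]))

theorem pvUnit_succB {tiles : List String} {s t : pvSt} (h : pvUnit s)
    (ht : t ∈ pvSuccB tiles s) : pvUnit t := by
  simp only [pvSuccB, pvB_out] at ht
  split_ifs at ht <;> simp only [List.map_cons, List.map_nil, List.mem_singleton,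
    List.mem_cons, List.not_mem_nil, or_false] at ht <;>
    (rcases h with ⟨a, b⟩ | ⟨a, b⟩ | ⟨a, b⟩ | ⟨a, b⟩ <;>
      first
        | (subst ht; simp [pvUnit, a, b])
        | (rcases ht with rfl | rfl <;> simp [pvUnit, a, b]))

theorem pvUnit_reachA {tiles : List String} {cols rows : Int} {s t : pvSt} (h : pvUnit s)
    (hr : pvReach tiles cols rows pvSuccA s t) : pvUnit t := by
  induction hr with
  | refl _ => exact h
  | step _ hu _ ih => exact pvUnit_succA ih hu

theorem pvUnit_reachB {tiles : List String} {cols rows : Int} {s t : pvSt} (h : pvUnit s)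
    (hr : pvReach tiles cols rows pvSuccB s t) : pvUnit t := by
  induction hr with
  | refl _ => exact h
  | step _ hu _ ih => exact pvUnit_succB ih hu

theorem pvReachA_of_B {tiles : List String} {cols rows : Int} {s0 t : pvSt} (hu : pvUnit s0)
    (hr : pvReach tiles cols rows pvSuccB s0 t) : pvReach tiles cols rows pvSuccA s0 t := by
  induction hr with
  | refl h => exact pvReach.refl _ h
  | @step t u hpr hsucc hok ih =>
    have hut : pvUnit t := pvUnit_reachB hu hpr
    have hokt : pvOk cols rows t := pvReach_ok hpr
    simp only [pvSuccB, pvB_out] at hsucc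
    rw [pvSq_eq] at hsucc
    split_ifs at hsucc with hc1 hc2 hc3 hc4 <;>
      simp only [List.map_cons, List.map_nil, List.mem_singleton, List.mem_cons,
        List.not_mem_nil, or_false] at hsucc
    · subst hsucc
      exact pvReach.step ih (by simp [pvSuccA, hc1]) hok
    · subst hsucc
      exact pvReach.step ih (by simp [pvSuccA, hc1, hc2]) hok
    · -- '|' hit broadside: the two emitted beams
      have hd : (t.2.2.1 = 1 ∧ t.2.2.2 = 0) ∨ (t.2.2.1 = -1 ∧ t.2.2.2 = 0) := by
        rcases hut with h | h | h | h
        · exact Or.inl h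
        · exact Or.inr h
        · exact absurd h.1 hc3.2
        · exact absurd h.1 hc3.2
      have hsA : pvSuccA tiles t =
          [(t.1 + 0, t.2.1 + -t.2.2.1, 0, -t.2.2.1), (t.1, t.2.1, 0, t.2.2.1)] := by
        simp [pvSuccA, hc3.1, hc3.2]
      have hgmem : (t.1, t.2.1, 0, t.2.2.1) ∈ pvSuccA tiles t := by rw [hsA]; simp
      have hgok : pvOk cols rows (t.1, t.2.1, 0, t.2.2.1) :=
        ⟨hokt.1, hokt.2.1, hokt.2.2.1, hokt.2.2.2⟩
      have hgsucc : pvSuccA tiles (t.1, t.2.1, 0, t.2.2.1) =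
          [(t.1 + 0, t.2.1 + t.2.2.1, 0, t.2.2.1)] := by
        simp [pvSuccA, hc3.1]
      rcases hd with ⟨a, b⟩ | ⟨a, b⟩ <;> rcases hsucc with rfl | rfl
      · refine pvReach.step (pvReach.step ih hgmem hgok) ?_ hok
        rw [hgsucc, a]; simp
      · refine pvReach.step ih ?_ hok
        rw [hsA, a]; simp
      · refine pvReach.step ih ?_ hok
        rw [hsA, a]; simp
      · refine pvReach.step (pvReach.step ih hgmem hgok) ?_ hok
        rw [hgsucc, a]; simp
    · -- '-' hit broadside
      have hd : (t.2.2.1 = 0 ∧ t.2.2.2 = 1) ∨ (t.2.2.1 = 0 ∧ t.2.2.2 = -1) := by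
        rcases hut with h | h | h | h
        · exact absurd h.2 hc4.2
        · exact absurd h.2 hc4.2
        · exact Or.inl h
        · exact Or.inr h
      have hsA : pvSuccA tiles t =
          [(t.1 + -t.2.2.2, t.2.1 + 0, -t.2.2.2, 0), (t.1, t.2.1, t.2.2.2, 0)] := by
        simp [pvSuccA, hc4.1, hc4.2]
      have hgmem : (t.1, t.2.1, t.2.2.2, 0) ∈ pvSuccA tiles t := by rw [hsA]; simp
      have hgok : pvOk cols rows (t.1, t.2.1, t.2.2.2, 0) :=
        ⟨hokt.1, hokt.2.1, hokt.2.2.1, hokt.2.2.2⟩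
      have hgsucc : pvSuccA tiles (t.1, t.2.1, t.2.2.2, 0) =
          [(t.1 + t.2.2.2, t.2.1 + 0, t.2.2.2, 0)] := by
        simp [pvSuccA, hc4.1]
      rcases hd with ⟨a, b⟩ | ⟨a, b⟩ <;> rcases hsucc with rfl | rfl
      · refine pvReach.step (pvReach.step ih hgmem hgok) ?_ hok
        rw [hgsucc, b]; simp
      · refine pvReach.step ih ?_ hok
        rw [hsA, b]; simp
      · refine pvReach.step ih ?_ hok
        rw [hsA, b]; simp
      · refine pvReach.step (pvReach.step ih hgmem hgok) ?_ hok
        rw [hgsucc, b]; simp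
    · subst hsucc
      refine pvReach.step ih ?_ hok
      by_cases g3 : pvA_sq tiles t.1 t.2.1 = '|'
      · have hdx : t.2.2.1 = 0 := by by_contra hnz; exact hc3 ⟨g3, hnz⟩
        simp [pvSuccA, g3, hdx]
      · by_cases g5 : pvA_sq tiles t.1 t.2.1 = '-'
        · have hdy : t.2.2.2 = 0 := by by_contra hnz; exact hc4 ⟨g5, hnz⟩
          simp [pvSuccA, g5, g3, hdy, hc1, hc2]
        · simp [pvSuccA, hc1, hc2, g3, g5]

-- a state A records but B does not: the unmoved split beam sitting on its splitter; its
-- position and its A-successor are both covered by a B-reachable beam at the same cell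
def pvGhost (tiles : List String) (cols rows : Int) (s0 t : pvSt) : Prop :=
  ∃ b : pvSt, b.1 = t.1 ∧ b.2.1 = t.2.1 ∧ pvReach tiles cols rows pvSuccB s0 b ∧
    ((pvA_sq tiles t.1 t.2.1 = '|' ∧ t.2.2.1 = 0 ∧ (t.2.2.2 = 1 ∨ t.2.2.2 = -1) ∧
        b.2.2.1 ≠ 0 ∧ b.2.2.2 = 0) ∨
     (pvA_sq tiles t.1 t.2.1 = '-' ∧ t.2.2.2 = 0 ∧ (t.2.2.1 = 1 ∨ t.2.2.1 = -1) ∧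
        b.2.2.1 = 0 ∧ b.2.2.2 ≠ 0))

theorem pvGhost_step {tiles : List String} {cols rows : Int} {s0 t u : pvSt}
    (hg : pvGhost tiles cols rows s0 t) (hsucc : u ∈ pvSuccA tiles t)
    (hok : pvOk cols rows u) : pvReach tiles cols rows pvSuccB s0 u := by
  obtain ⟨b, hb1, hb2, hbr, hcase⟩ := hg
  rcases hcase with ⟨hsq, hdx, hdy, hbx, hby⟩ | ⟨hsq, hdy, hdx, hbx, hby⟩
  · simp only [pvSuccA, hsq, hdx] at hsucc
    simp at hsucc
    subst hsucc
    refine pvReach.step hbr ?_ hok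
    have hsqb : pvB_sq tiles b.1 b.2.1 = '|' := by rw [pvSq_eq, hb1, hb2]; exact hsq
    simp only [pvSuccB, pvB_out, hsqb, hbx, hby]
    simp [hb1, hb2, hdx]
    rcases hdy with h | h <;> simp [h, hbx]
  · simp only [pvSuccA, hsq, hdy] at hsucc
    simp at hsucc
    subst hsucc
    refine pvReach.step hbr ?_ hok
    have hsqb : pvB_sq tiles b.1 b.2.1 = '-' := by rw [pvSq_eq, hb1, hb2]; exact hsq
    simp only [pvSuccB, pvB_out, hsqb, hbx, hby]
    simp [hb1, hb2, hdy]
    rcases hdx with h | h <;> simp [h, hby]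

theorem pvReachA_to_B {tiles : List String} {cols rows : Int} {s0 t : pvSt} (hu : pvUnit s0)
    (hr : pvReach tiles cols rows pvSuccA s0 t) :
    pvReach tiles cols rows pvSuccB s0 t ∨ pvGhost tiles cols rows s0 t := by
  induction hr with
  | refl h => exact Or.inl (pvReach.refl _ h)
  | @step t u hpr hsucc hok ih =>
    rcases ih with hbt | hg
    · have hut : pvUnit t := pvUnit_reachA hu (pvReachA_of_B hu hbt)
      have hokt : pvOk cols rows t := pvReach_ok hbt
      simp only [pvSuccA] at hsucc
      split_ifs at hsucc with hc1 hc2 hc3 hc4 hc5 hc6 <;>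
        simp only [List.mem_singleton, List.mem_cons, List.not_mem_nil, or_false] at hsucc
      · subst hsucc
        refine Or.inl (pvReach.step hbt ?_ hok)
        simp [pvSuccB, pvB_out, pvSq_eq, hc1]
      · subst hsucc
        refine Or.inl (pvReach.step hbt ?_ hok)
        simp [pvSuccB, pvB_out, pvSq_eq, hc1, hc2]
      · have hd : (t.2.2.1 = 1 ∧ t.2.2.2 = 0) ∨ (t.2.2.1 = -1 ∧ t.2.2.2 = 0) := by
          rcases hut with h | h | h | h
          · exact Or.inl h
          · exact Or.inr h
          · exact absurd h.1 hc4
          · exact absurd h.1 hc4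
        rcases hsucc with rfl | rfl
        · refine Or.inl (pvReach.step hbt ?_ hok)
          simp only [pvSuccB, pvB_out, pvSq_eq, hc3]
          rcases hd with ⟨a, b⟩ | ⟨a, b⟩ <;> simp [a, b, hc4]
        · refine Or.inr ⟨t, rfl, rfl, hbt, Or.inl ⟨hc3, rfl, ?_, hc4, ?_⟩⟩
          · rcases hd with ⟨a, _⟩ | ⟨a, _⟩
            · exact Or.inl a
            · exact Or.inr a
          · rcases hd with ⟨_, b⟩ | ⟨_, b⟩ <;> exact b
      · subst hsucc
        refine Or.inl (pvReach.step hbt ?_ hok)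
        have h0 : t.2.2.1 = 0 := not_not.1 hc4
        simp [pvSuccB, pvB_out, pvSq_eq, hc1, hc2, hc3, h0]
      · have hd : (t.2.2.1 = 0 ∧ t.2.2.2 = 1) ∨ (t.2.2.1 = 0 ∧ t.2.2.2 = -1) := by
          rcases hut with h | h | h | h
          · exact absurd h.2 hc6
          · exact absurd h.2 hc6
          · exact Or.inl h
          · exact Or.inr h
        rcases hsucc with rfl | rfl
        · refine Or.inl (pvReach.step hbt ?_ hok)
          simp only [pvSuccB, pvB_out, pvSq_eq, hc5]
          have hno : ¬ (pvA_sq tiles t.1 t.2.1 = '|') := by rw [hc5]; decide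
          rcases hd with ⟨a, b⟩ | ⟨a, b⟩ <;> simp [a, b, hc6, hc1, hc2, hno]
        · refine Or.inr ⟨t, rfl, rfl, hbt, Or.inr ⟨hc5, rfl, ?_, ?_, hc6⟩⟩
          · rcases hd with ⟨_, b⟩ | ⟨_, b⟩
            · exact Or.inl b
            · exact Or.inr b
          · rcases hd with ⟨a, _⟩ | ⟨a, _⟩ <;> exact a
      · subst hsucc
        refine Or.inl (pvReach.step hbt ?_ hok)
        have h0 : t.2.2.2 = 0 := not_not.1 hc6
        simp [pvSuccB, pvB_out, pvSq_eq, hc1, hc2, hc5, h0]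
      · subst hsucc
        refine Or.inl (pvReach.step hbt ?_ hok)
        simp [pvSuccB, pvB_out, pvSq_eq, hc1, hc2, hc3, hc5]
    · exact Or.inl (pvGhost_step hg hsucc hok)

theorem pvPos_iff (tiles : List String) (cols rows : Int) {s0 : pvSt} (hu : pvUnit s0)
    (a : Int × Int) :
    (∃ t : pvSt, pvReach tiles cols rows pvSuccA s0 t ∧ (t.1, t.2.1) = a) ↔
    (∃ t : pvSt, pvReach tiles cols rows pvSuccB s0 t ∧ (t.1, t.2.1) = a) := by
  constructor
  · rintro ⟨t, hr, heq⟩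
    rcases pvReachA_to_B hu hr with h | ⟨b, hb1, hb2, hbr, _⟩
    · exact ⟨t, h, heq⟩
    · exact ⟨b, hbr, by rw [hb1, hb2]; exact heq⟩
  · rintro ⟨t, hr, heq⟩
    exact ⟨t, pvReachA_of_B hu hr, heq⟩

theorem pvSetLen_congr {l1 l2 : List (Int × Int)} (h : ∀ a, a ∈ l1 ↔ a ∈ l2) :
    PySem.Set.len (PySem.Set.ofList l1) = PySem.Set.len (PySem.Set.ofList l2) := by
  unfold PySem.Set.len
  have hfin : (PySem.Set.ofList l1 : List (Int × Int)).toFinset =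
      (PySem.Set.ofList l2 : List (Int × Int)).toFinset := by
    ext a
    simp only [List.mem_toFinset, PySem.Set.mem_ofList]
    exact h a
  rw [← List.toFinset_card_of_nodup (PySem.Set.nodup_ofList l1),
    ← List.toFinset_card_of_nodup (PySem.Set.nodup_ofList l2), hfin]

theorem pvCount_eq (tiles : List String) (cols rows : Int) (s : pvSt) (hu : pvUnit s) :
    PySem.Set.len (PySem.Set.ofList ((pvA_loop tiles cols rows (s.1, s.2.1)
      (s.2.2.1, s.2.2.2) [] PySem.Set.empty).map (fun t => (t.1, t.2.1)))) =
    PySem.Set.len (PySem.Set.ofList ((pvB_iter tiles cols rows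
      (if 0 ≤ s.1 ∧ s.1 < cols ∧ 0 ≤ s.2.1 ∧ s.2.1 < rows then
        PySem.Set.add PySem.Set.empty s
      else PySem.Set.empty)).map (fun t => (t.1, t.2.1)))) := by
  apply pvSetLen_congr
  intro a
  simp only [List.mem_map]
  constructor
  · rintro ⟨t, ht, heq⟩
    have hr := (pvA_loop_char tiles cols rows s t).1 ht
    obtain ⟨t', hr', heq'⟩ := (pvPos_iff tiles cols rows hu a).1 ⟨t, hr, heq⟩
    exact ⟨t', (pvB_start_char tiles cols rows s t').2 hr', heq'⟩
  · rintro ⟨t, ht, heq⟩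
    have hr := (pvB_start_char tiles cols rows s t).1 ht
    obtain ⟨t', hr', heq'⟩ := (pvPos_iff tiles cols rows hu a).2 ⟨t, hr, heq⟩
    exact ⟨t', (pvA_loop_char tiles cols rows s t').2 hr', heq'⟩

theorem pvMain (tiles : List String) : energized_tiles tiles = energized_tiles_alt tiles := by
  unfold energized_tiles energized_tiles_alt
  refine PySem.List.foldl_congr_mem _ _ _ _ ?_
  intro acc s hs
  simp only [List.mem_append, List.mem_map] at hs
  obtain ((h | h) | h) | h := hs
  · obtain ⟨y, -, hy⟩ := h
    subst hy
    exact congrArg (max acc) (pvCount_eq tiles _ _ _ (by simp [pvUnit]))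
  · obtain ⟨y, -, hy⟩ := h
    subst hy
    exact congrArg (max acc) (pvCount_eq tiles _ _ _ (by simp [pvUnit]))
  · obtain ⟨y, -, hy⟩ := h
    subst hy
    exact congrArg (max acc) (pvCount_eq tiles _ _ _ (by simp [pvUnit]))
  · obtain ⟨y, -, hy⟩ := h
    subst hy
    exact congrArg (max acc) (pvCount_eq tiles _ _ _ (by simp [pvUnit]))

-- ===== VERDICT (by name: the statement is the Claim_ definition above) =====
theorem energized_tiles_spec : Claim_equal_energized_tiles := by
  unfold Claim_equal_energized_tiles
  intro tiles _ _
  unfold Spec_energized_tiles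
  exact pvMain tiles
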